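-- pv_equiv track=rewrite | github.com/acc-cosc-1336-fall-2023/final-JZarz | src/question_a/question_a.py | create_multiplication_table
-- ===== SOURCE A (Python) =====
-- def create_multiplication_table(num1, num2):
--     table = []
--     i = 0
--     while i < num1:
--         row = []
--         j = 0
--         while j < num2:
--              product = (i+1)*(j+1)
--              row.append(product)
--              j += 1
--         table.append(row)
--         i += 1
--     return table
-- ===== SOURCE B (Python) =====
-- def create_multiplication_table(num1, num2):
--     if num1 <= 0:
--         return []
--     base = list(range(1, num2 + 1))
--     table = []
--     cur = base
--     for _ in range(num1):
--         table.append(cur)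
--         cur = [c + b for c, b in zip(cur, base)]
--     return table
-- ===== Notes on version B (the rewrite author's own statement) =====
-- stated objective: alternative
-- what changed: Each row is derived from the previous one by element-wise addition of a precomputed base row (running-sum/zip decomposition) instead of recomputing (i+1)*(j+1) for every cell with nested index loops.
import Mathlib
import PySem

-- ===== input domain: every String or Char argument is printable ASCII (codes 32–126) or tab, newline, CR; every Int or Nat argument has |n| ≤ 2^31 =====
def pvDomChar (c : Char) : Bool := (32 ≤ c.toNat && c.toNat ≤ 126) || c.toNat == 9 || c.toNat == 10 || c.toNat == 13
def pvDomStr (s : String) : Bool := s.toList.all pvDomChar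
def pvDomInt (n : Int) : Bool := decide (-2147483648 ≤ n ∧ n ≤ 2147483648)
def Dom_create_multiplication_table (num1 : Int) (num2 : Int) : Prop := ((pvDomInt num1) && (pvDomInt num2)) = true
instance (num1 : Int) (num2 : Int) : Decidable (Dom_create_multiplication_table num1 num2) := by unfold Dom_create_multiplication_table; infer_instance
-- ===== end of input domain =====

-- B builds each row from the previous by element-wise addition of a base row instead of
-- recomputing (i+1)*(j+1) per cell; alternative decomposition, same cost. A = B on all inputs.


-- ===== PORT A =====
-- while i < num1 with i starting at 0 and i += 1 ≡ for i in range(num1); same for j.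
def create_multiplication_table (num1 : Int) (num2 : Int) : List (List Int) :=
  (PySem.List.pyRange 0 num1 1).foldl
    (fun table i =>
      table ++ [(PySem.List.pyRange 0 num2 1).foldl (fun row j => row ++ [(i + 1) * (j + 1)]) []])
    []

-- ===== PORT B =====
def create_multiplication_table_alt (num1 : Int) (num2 : Int) : List (List Int) :=
  if num1 <= 0 then [] else
  let base := PySem.List.pyRange 1 (num2 + 1) 1
  ((PySem.List.pyRange 0 num1 1).foldl
    (fun st _ => (st.1 ++ [st.2], List.zipWith (· + ·) st.2 base))
    (([] : List (List Int)), base)).1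

-- ===== PRECONDITION & SPEC =====
def Spec_create_multiplication_table (num1 : Int) (num2 : Int) (out : List (List Int)) : Prop := out = create_multiplication_table_alt num1 num2
instance (num1 : Int) (num2 : Int) (out : List (List Int)) : Decidable (Spec_create_multiplication_table num1 num2 out) := by unfold Spec_create_multiplication_table; infer_instance

-- ===== CLAIM (what is proved, stated in full; the proofs are below) =====
def Claim_equal_create_multiplication_table : Prop := ∀ (num1 : Int) (num2 : Int), Dom_create_multiplication_table num1 num2 → Spec_create_multiplication_table num1 num2 (create_multiplication_table num1 num2)

-- ===== LEMMAS AND PROOFS =====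

theorem foldl_append_singleton {α β : Type} (f : α → β) :
    ∀ (l : List α) (acc : List β),
      l.foldl (fun r j => r ++ [f j]) acc = acc ++ l.map f := by
  intro l
  induction l with
  | nil => simp
  | cons x xs ih => intro acc; simp [List.foldl_cons, ih]

theorem zipWith_add_map_mul (c : Int) :
    ∀ (base : List Int),
      List.zipWith (· + ·) (base.map (fun b => c * b)) base
        = base.map (fun b => (c + 1) * b) := by
  intro base
  induction base with
  | nil => rfl
  | cons x xs ih => simp [ih]; ring

theorem loopB (base : List Int) :
    ∀ (l : List Int) (tbl : List (List Int)) (cur : List Int) (c : Int),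
      cur = base.map (fun b => c * b) →
      (l.foldl (fun st _ => (st.1 ++ [st.2], List.zipWith (· + ·) st.2 base)) (tbl, cur)).1
      = tbl ++ (List.range l.length).map (fun (k : Nat) => base.map (fun b => (c + (k : Int)) * b)) := by
  intro l
  induction l with
  | nil => intro tbl cur c h; simp
  | cons x xs ih =>
    intro tbl cur c h
    subst h
    rw [List.foldl_cons, zipWith_add_map_mul c base,
      ih (tbl ++ [base.map (fun b => c * b)]) _ (c + 1) rfl,
      List.length_cons, List.range_succ_eq_map, List.map_cons, List.map_map,
      List.append_assoc, List.singleton_append]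
    congr 1
    · simp
      intro a _ b _
      left
      ring

theorem portA_eq (num1 num2 : Int) :
    create_multiplication_table num1 num2
      = (List.range num1.toNat).map
          (fun (k : Nat) => (List.range num2.toNat).map (fun (j : Nat) => ((k : Int) + 1) * ((j : Int) + 1))) := by
  unfold create_multiplication_table
  rw [foldl_append_singleton]
  rw [PySem.List.pyRange_one 0 num1]
  simp only [List.nil_append, List.map_map, Int.sub_zero]
  apply List.map_congr_left
  intro k _
  simp only [Function.comp, Int.zero_add]
  rw [foldl_append_singleton]
  rw [PySem.List.pyRange_one 0 num2]
  simp [Function.comp]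

theorem portB_eq (num1 num2 : Int) :
    create_multiplication_table_alt num1 num2
      = (List.range num1.toNat).map
          (fun (k : Nat) => (List.range num2.toNat).map (fun (j : Nat) => ((k : Int) + 1) * ((j : Int) + 1))) := by
  unfold create_multiplication_table_alt
  by_cases h : num1 ≤ 0
  · rw [if_pos h]
    have : num1.toNat = 0 := by omega
    rw [this]
    simp
  · rw [if_neg h]
    show ((PySem.List.pyRange 0 num1 1).foldl
        (fun st _ => (st.1 ++ [st.2], List.zipWith (· + ·) st.2 (PySem.List.pyRange 1 (num2 + 1) 1)))
        (([] : List (List Int)), PySem.List.pyRange 1 (num2 + 1) 1)).1 = _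
    rw [loopB (PySem.List.pyRange 1 (num2 + 1) 1) (PySem.List.pyRange 0 num1 1) []
        (PySem.List.pyRange 1 (num2 + 1) 1) 1 (by simp)]
    simp only [List.nil_append, PySem.List.length_pyRange_one, Int.sub_zero]
    apply List.map_congr_left
    intro k _
    rw [PySem.List.pyRange_one 1 (num2 + 1)]
    simp only [List.map_map]
    have h2 : (num2 + 1 - 1).toNat = num2.toNat := by omega
    rw [h2]
    apply List.map_congr_left
    intro j _
    simp only [Function.comp_apply]
    ring

-- ===== VERDICT (by name: the statement is the Claim_ definition above) =====
theorem create_multiplication_table_spec : Claim_equal_create_multiplication_table := by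
  intro num1 num2 _
  unfold Spec_create_multiplication_table
  rw [portA_eq, portB_eq]
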